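-- pv_equiv track=rewrite | github.com/Wordcab/rtasr | src/rtasr/utils.py | attach_punctuation_to_last_word
-- ===== SOURCE A (Python) =====
-- import string
--
-- def attach_punctuation_to_last_word(sentence: str) -> str:
--     """
--     Attach punctuation to the last word of a sentence.
--
--     Args:
--         sentence (str):
--             Sentence to attach punctuation to.
--
--     Returns:
--         Sentence with punctuation attached to the last word.
--     """
--     if isinstance(sentence, str) and sentence != "":
--         words = sentence.split()
--
--         sentence = ""
--         for word in words:
--             if word in string.punctuation:
--                 sentence += word
--             else:
--                 sentence += " " + word
--
--     return sentence.strip()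
-- ===== SOURCE B (Python) =====
-- import string
--
--
-- def attach_punctuation_to_last_word(sentence: str) -> str:
--     """Right-to-left pass: collect runs of punctuation tokens and glue each run
--     to the word on its left, building the parts list back-to-front."""
--     if not isinstance(sentence, str) or sentence == "":
--         return sentence.strip()
--     parts = []
--     pending = ""
--     for word in reversed(sentence.split()):
--         if word in string.punctuation:
--             pending = word + pending
--         else:
--             parts.append(word + pending)
--             pending = ""
--     if pending:
--         parts.append(pending)
--     return " ".join(reversed(parts))
-- ===== Notes on version B (the rewrite author's own statement) =====
-- stated objective: alternative
-- what changed: B traverses the words RIGHT-TO-LEFT, accumulating each run of punctuation tokens in a pending buffer that is glued onto the word to its left, building the parts list back-to-front and joining after a final reversal, instead of A's forward pass that appends every word to one string with a conditional leading space and strips at the end.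
import Mathlib
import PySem

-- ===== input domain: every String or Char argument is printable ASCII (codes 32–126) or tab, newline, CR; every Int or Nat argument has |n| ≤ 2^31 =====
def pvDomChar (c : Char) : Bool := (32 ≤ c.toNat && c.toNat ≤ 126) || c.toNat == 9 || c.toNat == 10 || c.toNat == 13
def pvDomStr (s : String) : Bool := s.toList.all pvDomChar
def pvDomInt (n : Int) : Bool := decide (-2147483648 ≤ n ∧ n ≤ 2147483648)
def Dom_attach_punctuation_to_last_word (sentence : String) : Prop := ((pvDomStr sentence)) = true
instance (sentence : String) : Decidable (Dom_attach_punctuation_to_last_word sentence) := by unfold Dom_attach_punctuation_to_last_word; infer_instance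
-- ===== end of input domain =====

-- B traverses the words right-to-left, gluing each run of punctuation tokens onto the
-- word to its left and building the parts list back-to-front, instead of A's forward
-- string accumulator with conditional leading spaces plus a final strip (objective: alternative).

-- string.punctuation
def pvPunct : List Char := "!\"#$%&'()*+,-./:;<=>?@[\\]^_`{|}~".toList

-- ===== PORT A =====
-- loop body: 'sentence += word' if 'word in string.punctuation' else 'sentence += " " + word'
def stepA (acc : List Char) (w : List Char) : List Char :=
  if PySem.Chars.isIn w pvPunct then acc ++ w else acc ++ (' ' :: w)

def attach_punctuation_to_last_word (sentence : String) : String :=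
  if sentence ≠ "" then
    let words := PySem.Chars.split₀ sentence.toList
    String.ofList (PySem.Chars.strip (words.foldl stepA []))
  else
    String.ofList (PySem.Chars.strip sentence.toList)

-- ===== PORT B =====
-- loop body over reversed(words), state (parts, pending):
--   'pending = word + pending' if 'word in string.punctuation' else 'parts.append(word + pending); pending = ""'
def stepR (st : List (List Char) × List Char) (w : List Char) : List (List Char) × List Char :=
  if PySem.Chars.isIn w pvPunct then (st.1, w ++ st.2) else (st.1 ++ [w ++ st.2], [])

def attach_punctuation_to_last_word_alt (sentence : String) : String :=
  if sentence = "" then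
    String.ofList (PySem.Chars.strip sentence.toList)
  else
    let words := PySem.Chars.split₀ sentence.toList
    let st := (words.reverse).foldl stepR ([], [])
    let parts := if st.2 ≠ [] then st.1 ++ [st.2] else st.1
    String.ofList (PySem.Chars.join [' '] parts.reverse)

-- ===== PRECONDITION & SPEC =====
def Spec_attach_punctuation_to_last_word (sentence : String) (out : String) : Prop := out = attach_punctuation_to_last_word_alt sentence
instance (sentence : String) (out : String) : Decidable (Spec_attach_punctuation_to_last_word sentence out) := by unfold Spec_attach_punctuation_to_last_word; infer_instance

-- ===== CLAIM (what is proved, stated in full; the proofs are below) =====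
def Claim_equal_attach_punctuation_to_last_word : Prop := ∀ (sentence : String), Dom_attach_punctuation_to_last_word sentence → Spec_attach_punctuation_to_last_word sentence (attach_punctuation_to_last_word sentence)

-- ===== LEMMAS AND PROOFS =====

-- proof-side intermediate: the forward merged-word list (each punctuation token merged
-- into the previous entry); A's result and B's result are both related to it
def stepB (m : List (List Char)) (w : List Char) : List (List Char) :=
  if m ≠ [] ∧ PySem.Chars.isIn w pvPunct then m.dropLast ++ [m.getLastD [] ++ w] else m ++ [w]

-- a word produced by split(): nonempty and whitespace-free
def GoodW (w : List Char) : Prop := w ≠ [] ∧ ∀ c ∈ w, PySem.Chars.isspace c = false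

lemma split₀_go_good (s : List Char) : ∀ (cur acc : _),
    (∀ w ∈ acc, GoodW w) → (∀ c ∈ cur, PySem.Chars.isspace c = false) →
    ∀ w ∈ PySem.Chars.split₀.go s cur acc, GoodW w := by
  induction s with
  | nil =>
    intro cur acc hacc hcur w hw
    simp only [PySem.Chars.split₀.go] at hw
    by_cases hc : cur.isEmpty
    · simp [hc] at hw; exact hacc _ (by simpa using hw)
    · simp [hc, List.mem_reverse] at hw
      rcases hw with h | h
      · exact hacc _ h
      · subst h
        exact ⟨by simpa [List.isEmpty_iff] using hc, fun c hcmem => hcur c (by simpa using hcmem)⟩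
  | cons c rest ih =>
    intro cur acc hacc hcur w hw
    simp only [PySem.Chars.split₀.go] at hw
    by_cases hs : PySem.Chars.isspace c
    · by_cases hc : cur.isEmpty
      · simp [hs, hc] at hw
        exact ih [] acc hacc (by simp) w hw
      · simp [hs, hc] at hw
        refine ih [] (cur.reverse :: acc) ?_ (by simp) w hw
        intro v hv
        rcases List.mem_cons.mp hv with h | h
        · subst h
          exact ⟨by simpa [List.isEmpty_iff] using hc, fun d hd => hcur d (by simpa using hd)⟩
        · exact hacc _ h
    · simp [hs] at hw
      refine ih (c :: cur) acc hacc ?_ w hw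
      intro d hd
      rcases List.mem_cons.mp hd with h | h
      · subst h; simpa using hs
      · exact hcur d h

lemma split₀_good (s : List Char) : ∀ w ∈ PySem.Chars.split₀ s, GoodW w :=
  split₀_go_good s [] [] (by simp) (by simp)

-- " ".join(merged) after 'merged[-1] += w' appends w directly
lemma join_cons_of_ne (x : List Char) (l : List (List Char)) (hl : l ≠ []) :
    PySem.Chars.join [' '] (x :: l) = x ++ [' '] ++ PySem.Chars.join [' '] l := by
  cases l with
  | nil => exact absurd rfl hl
  | cons y t => exact PySem.Chars.join_cons_cons _ _ _ _

lemma join_merge_last (m : List (List Char)) (w : List Char) (hm : m ≠ []) :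
    PySem.Chars.join [' '] (m.dropLast ++ [m.getLastD [] ++ w])
      = PySem.Chars.join [' '] m ++ w := by
  induction m with
  | nil => exact absurd rfl hm
  | cons x t ih =>
    cases t with
    | nil => simp [PySem.Chars.join_singleton]
    | cons y t' =>
      have h1 : (x :: y :: t').dropLast ++ [(x :: y :: t').getLastD [] ++ w]
          = x :: ((y :: t').dropLast ++ [(y :: t').getLastD [] ++ w]) := by
        simp [List.dropLast_cons₂]
      rw [h1, join_cons_of_ne _ _ (by simp), ih (by simp),
        join_cons_of_ne x (y :: t') (by simp)]
      simp [List.append_assoc]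

-- " ".join(merged + [w]) adds ' ' ++ w
lemma join_snoc (m : List (List Char)) (w : List Char) (hm : m ≠ []) :
    PySem.Chars.join [' '] (m ++ [w]) = PySem.Chars.join [' '] m ++ (' ' :: w) := by
  induction m with
  | nil => exact absurd rfl hm
  | cons x t ih =>
    cases t with
    | nil => simp [PySem.Chars.join_cons_cons, PySem.Chars.join_singleton]
    | cons y t' =>
      have := ih (by simp)
      simp only [List.cons_append, PySem.Chars.join_cons_cons] at *
      simp [this]

lemma join_head (m : List (List Char)) (hm : m ≠ []) (hg : ∀ w ∈ m, GoodW w) :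
    ∃ c, (PySem.Chars.join [' '] m).head? = some c ∧ PySem.Chars.isspace c = false := by
  cases m with
  | nil => exact absurd rfl hm
  | cons x t =>
    obtain ⟨hx, hxc⟩ := hg x (by simp)
    obtain ⟨c, x', rfl⟩ : ∃ c x', x = c :: x' := by
      cases x with
      | nil => exact absurd rfl hx
      | cons c x' => exact ⟨c, x', rfl⟩
    refine ⟨c, ?_, hxc c (by simp)⟩
    cases t with
    | nil => simp [PySem.Chars.join_singleton]
    | cons y t' => simp [PySem.Chars.join_cons_cons]

lemma join_last (m : List (List Char)) (hm : m ≠ []) (hg : ∀ w ∈ m, GoodW w) :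
    ∃ c, (PySem.Chars.join [' '] m).getLast? = some c ∧ PySem.Chars.isspace c = false := by
  induction m with
  | nil => exact absurd rfl hm
  | cons x t ih =>
    cases t with
    | nil =>
      obtain ⟨hx, hxc⟩ := hg x (by simp)
      refine ⟨x.getLast hx, ?_, hxc _ (List.getLast_mem hx)⟩
      simp [PySem.Chars.join_singleton, List.getLast?_eq_some_getLast hx]
    | cons y t' =>
      obtain ⟨c, hc, hcs⟩ := ih (by simp) (fun w hw => hg w (by simp [hw]))
      refine ⟨c, ?_, hcs⟩
      rw [PySem.Chars.join_cons_cons]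
      have hne : PySem.Chars.join [' '] (y :: t') ≠ [] := by
        obtain ⟨d, hd, _⟩ := join_head (y :: t') (by simp) (fun w hw => hg w (by simp [hw]))
        intro h; rw [h] at hd; simp at hd
      rw [List.getLast?_append_of_ne_nil _ hne]
      exact hc

lemma lstrip_id (l : List Char) (h : ∃ c, l.head? = some c ∧ PySem.Chars.isspace c = false) :
    PySem.Chars.lstrip l = l := by
  obtain ⟨c, hc, hs⟩ := h
  cases l with
  | nil => simp at hc
  | cons x t =>
    simp at hc; subst hc
    simp [PySem.Chars.lstrip, hs]

lemma rstrip_id (l : List Char) (h : ∃ c, l.getLast? = some c ∧ PySem.Chars.isspace c = false) :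
    PySem.Chars.rstrip l = l := by
  obtain ⟨c, hc, hs⟩ := h
  have : l.reverse.head? = some c := by simpa using hc
  unfold PySem.Chars.rstrip
  cases hr : l.reverse with
  | nil => simp [hr] at this
  | cons x t =>
    rw [hr] at this; simp at this; subst this
    have : (List.dropWhile PySem.Chars.isspace (x :: t)) = x :: t := by
      simp [hs]
    rw [this, ← hr, List.reverse_reverse]

-- the A-loop invariant: A's accumulator is an optional leading space plus the join of the merged list
lemma loop_eq (ws : List (List Char)) : ∀ (m : List (List Char)) (sp : List Char),
    (∀ w ∈ ws, GoodW w) → (∀ w ∈ m, GoodW w) → m ≠ [] → (sp = [] ∨ sp = [' ']) →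
    ws.foldl stepA (sp ++ PySem.Chars.join [' '] m) = sp ++ PySem.Chars.join [' '] (ws.foldl stepB m)
      ∧ (∀ w ∈ ws.foldl stepB m, GoodW w) ∧ ws.foldl stepB m ≠ [] := by
  induction ws with
  | nil => intro m sp _ hm hne _; exact ⟨rfl, hm, hne⟩
  | cons w ws ih =>
    intro m sp hws hm hne hsp
    have hw : GoodW w := hws w (by simp)
    have hws' : ∀ v ∈ ws, GoodW v := fun v hv => hws v (by simp [hv])
    by_cases hp : PySem.Chars.isIn w pvPunct
    · have hcond : m ≠ [] ∧ PySem.Chars.isIn w pvPunct = true := ⟨hne, hp⟩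
      have hA : stepA (sp ++ PySem.Chars.join [' '] m) w
          = sp ++ PySem.Chars.join [' '] (stepB m w) := by
        simp only [stepA, stepB]
        rw [if_pos hp, if_pos hcond, join_merge_last m w hne, List.append_assoc]
      have hmB : ∀ v ∈ stepB m w, GoodW v := by
        intro v hv
        simp only [stepB, if_pos hcond] at hv
        rcases List.mem_append.mp hv with hv | hv
        · exact hm v (List.mem_of_mem_dropLast hv)
        · have hv' : v = m.getLastD [] ++ w := by simpa using hv
          subst hv'
          have hlast : m.getLastD [] ∈ m := by
            cases m with
            | nil => exact absurd rfl hne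
            | cons x t =>
              rw [List.getLastD_eq_getLast?, List.getLast?_eq_some_getLast (l := x :: t) (by simp)]
              exact List.getLast_mem (l := x :: t) (by simp)
          obtain ⟨h1, h2⟩ := hm _ hlast
          obtain ⟨h3, h4⟩ := hw
          refine ⟨fun hcon => h3 (List.append_eq_nil_iff.mp hcon).2, fun c hc => ?_⟩
          rcases List.mem_append.mp hc with h | h
          · exact h2 c h
          · exact h4 c h
      have hBne : stepB m w ≠ [] := by
        simp only [stepB, if_pos hcond]; simp
      have := ih (stepB m w) sp hws' hmB hBne hsp
      simp only [List.foldl_cons, hA]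
      exact this
    · have hcond : ¬ (m ≠ [] ∧ PySem.Chars.isIn w pvPunct = true) := fun h => hp h.2
      have hA : stepA (sp ++ PySem.Chars.join [' '] m) w
          = sp ++ PySem.Chars.join [' '] (stepB m w) := by
        simp only [stepA, stepB]
        rw [if_neg hp, if_neg hcond, join_snoc m w hne, List.append_assoc]
      have hmB : ∀ v ∈ stepB m w, GoodW v := by
        intro v hv
        simp only [stepB, if_neg hcond] at hv
        rcases List.mem_append.mp hv with hv | hv
        · exact hm v hv
        · have hv' : v = w := by simp_all
          subst hv'; exact hw
      have hBne : stepB m w ≠ [] := by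
        simp only [stepB, if_neg hcond]; simp
      have := ih (stepB m w) sp hws' hmB hBne hsp
      simpa [List.foldl_cons, hA] using this

lemma strip_sp_join (sp l : List Char) (hsp : sp = [] ∨ sp = [' '])
    (hh : ∃ c, l.head? = some c ∧ PySem.Chars.isspace c = false)
    (hl : ∃ c, l.getLast? = some c ∧ PySem.Chars.isspace c = false) :
    PySem.Chars.strip (sp ++ l) = l := by
  have hstrip : PySem.Chars.strip l = l := by
    rw [PySem.Chars.strip, lstrip_id l hh, rstrip_id l hl]
  rcases hsp with rfl | rfl
  · simpa using hstrip
  · obtain ⟨c, hc, hs⟩ := hh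
    cases l with
    | nil => simp at hc
    | cons x t =>
      simp at hc; subst hc
      rw [PySem.Chars.strip]
      have h1 : PySem.Chars.lstrip ([' '] ++ x :: t) = x :: t := by
        simp [PySem.Chars.lstrip, hs,
          show PySem.Chars.isspace ' ' = true from by decide]
      rw [h1, rstrip_id _ (by simpa using hl)]

-- A's whole body equals " ".join of the merged list, at the character-list level
lemma chars_eq (cs : List Char) :
    PySem.Chars.strip ((PySem.Chars.split₀ cs).foldl stepA [])
      = PySem.Chars.join [' '] ((PySem.Chars.split₀ cs).foldl stepB []) := by
  have hgood := split₀_good cs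
  cases hws : PySem.Chars.split₀ cs with
  | nil => simp [PySem.Chars.join_nil, PySem.Chars.strip, PySem.Chars.lstrip, PySem.Chars.rstrip]
  | cons w ws =>
    have hw : GoodW w := by rw [hws] at hgood; exact hgood w (by simp)
    have hws' : ∀ v ∈ ws, GoodW v := by rw [hws] at hgood; exact fun v hv => hgood v (by simp [hv])
    have hA1 : stepA [] w = (if PySem.Chars.isIn w pvPunct then [] else [' ']) ++ PySem.Chars.join [' '] [w] := by
      by_cases hp : PySem.Chars.isIn w pvPunct <;> simp [stepA, hp, PySem.Chars.join_singleton]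
    have hB1 : stepB [] w = [w] := by simp [stepB]
    set sp := (if PySem.Chars.isIn w pvPunct then ([] : List Char) else [' ']) with hspdef
    have hsp : sp = [] ∨ sp = [' '] := by
      by_cases hp : PySem.Chars.isIn w pvPunct <;> simp [hspdef, hp]
    obtain ⟨heq, hgB, hneB⟩ := loop_eq ws [w] sp hws' (by intro v hv; simp at hv; subst hv; exact hw) (by simp) hsp
    rw [List.foldl_cons, List.foldl_cons, hA1, hB1, heq]
    exact strip_sp_join sp _ hsp
      (join_head _ hneB hgB) (join_last _ hneB hgB)

-- the right-to-left fold, written as a foldr (foldl over the reversed list)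
def foldRW (ws : List (List Char)) : List (List Char) × List Char :=
  ws.foldr (fun w st => stepR st w) ([], [])

-- forward merge from a nonempty list m, expressed via the right-to-left fold:
-- the leading punctuation run (foldRW ws).2 glues onto m's last entry, the rest follows
lemma foldB_eq_foldRW (ws : List (List Char)) : ∀ (m : List (List Char)), m ≠ [] →
    ws.foldl stepB m
      = m.dropLast ++ [m.getLastD [] ++ (foldRW ws).2] ++ (foldRW ws).1.reverse := by
  induction ws with
  | nil =>
    intro m hm
    simp only [foldRW, List.foldr_nil, List.foldl_nil, List.reverse_nil, List.append_nil,
      List.append_nil]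
    rw [List.getLastD_eq_getLast?, List.getLast?_eq_some_getLast hm]
    simp [List.dropLast_concat_getLast hm]
  | cons w ws ih =>
    intro m hm
    have hRW : foldRW (w :: ws) = stepR (foldRW ws) w := by
      simp [foldRW]
    by_cases hp : PySem.Chars.isIn w pvPunct
    · have hcond : m ≠ [] ∧ PySem.Chars.isIn w pvPunct = true := ⟨hm, hp⟩
      have hB : stepB m w = m.dropLast ++ [m.getLastD [] ++ w] := by
        simp [stepB, hcond]
      have hne : stepB m w ≠ [] := by rw [hB]; simp
      rw [List.foldl_cons, ih _ hne, hB, hRW]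
      simp only [stepR, if_pos hp]
      rw [List.dropLast_concat, List.getLastD_concat]
      simp [List.append_assoc]
    · have hcond : ¬ (m ≠ [] ∧ PySem.Chars.isIn w pvPunct = true) := fun h => hp h.2
      have hB : stepB m w = m ++ [w] := by simp [stepB, hcond]
      have hne : stepB m w ≠ [] := by rw [hB]; simp
      rw [List.foldl_cons, ih _ hne, hB, hRW]
      simp only [stepR, if_neg hp]
      rw [List.dropLast_concat, List.getLastD_concat]
      rw [List.getLastD_eq_getLast?, List.getLast?_eq_some_getLast hm]
      simp [List.dropLast_concat_getLast hm, List.append_assoc]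

-- B's final parts list (reversed, with a leftover pending group prepended) is the merged list
lemma parts_eq_foldB (cs : List Char) :
    (let st := foldRW (PySem.Chars.split₀ cs);
     (if st.2 ≠ [] then st.1 ++ [st.2] else st.1).reverse)
      = (PySem.Chars.split₀ cs).foldl stepB [] := by
  have hgood := split₀_good cs
  cases hws : PySem.Chars.split₀ cs with
  | nil => simp [foldRW]
  | cons w ws =>
    have hw : GoodW w := by rw [hws] at hgood; exact hgood w (by simp)
    have hB1 : stepB [] w = [w] := by simp [stepB]
    have hRW : foldRW (w :: ws) = stepR (foldRW ws) w := by simp [foldRW]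
    have hmain := foldB_eq_foldRW ws [w] (by simp)
    simp only [List.foldl_cons, hB1]
    rw [hmain]
    by_cases hp : PySem.Chars.isIn w pvPunct
    · simp only [hRW, stepR, if_pos hp]
      simp
      exact fun hcon => absurd hcon hw.1
    · simp only [hRW, stepR, if_neg hp]
      simp

-- ===== VERDICT (by name: the statement is the Claim_ definition above) =====
theorem attach_punctuation_to_last_word_spec : Claim_equal_attach_punctuation_to_last_word := by
  intro sentence _
  unfold Spec_attach_punctuation_to_last_word
  unfold attach_punctuation_to_last_word attach_punctuation_to_last_word_alt
  by_cases h : sentence = ""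
  · simp [h]
  · simp only [h, ne_eq, not_false_eq_true, if_true, if_false]
    refine congrArg String.ofList ?_
    rw [chars_eq sentence.toList, ← parts_eq_foldB sentence.toList]
    simp only [foldRW, ← List.foldl_reverse]
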